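-- pv_equiv track=rewrite | github.com/Bai1026/LLM_Persona | In_context_self_play/previous_exp/gan/gan_2.py | extract_conversation
-- ===== SOURCE A (Python) =====
-- def extract_conversation(messages):
--     system_message = None
--     scene_summary = []
--     last_user_message = None
--
--     last_user_index = None
--     for i, msg in enumerate(messages):
--         if msg.get("role") == "user":
--             last_user_index = i
--
--     for i, msg in enumerate(messages):
--         role = msg.get("role")
--         content = msg.get("content")
--
--         if role == "system":
--             system_message = content
--
--         elif role in ("user", "assistant"):
--             # pass the last user message
--             if role == "user" and i == last_user_index:
--                 last_user_message = content
--                 continue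
--             scene_summary.append(msg)
--
--     return system_message, scene_summary, last_user_message
-- ===== SOURCE B (Python) =====
-- def extract_conversation(messages):
--     # Single pass: collect all user/assistant messages, remember the position
--     # of the last user message inside the collected list, retract it at the end.
--     system_message = None
--     scene_summary = []
--     user_pos = None
--     for msg in messages:
--         role = msg.get("role")
--         if role == "system":
--             system_message = msg.get("content")
--         elif role == "user":
--             scene_summary.append(msg)
--             user_pos = len(scene_summary) - 1
--         elif role == "assistant":
--             scene_summary.append(msg)
--     last_user_message = None
--     if user_pos is not None:
--         last_user_message = scene_summary.pop(user_pos).get("content")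
--     return system_message, scene_summary, last_user_message
-- ===== Notes on version B (the rewrite author's own statement) =====
-- stated objective: alternative
-- what changed: Single traversal that appends every user/assistant message and records the last user's position in the built list, then pops it afterwards, instead of A's separate pre-scan for the last user index followed by a second index-comparing pass.
import Mathlib
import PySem

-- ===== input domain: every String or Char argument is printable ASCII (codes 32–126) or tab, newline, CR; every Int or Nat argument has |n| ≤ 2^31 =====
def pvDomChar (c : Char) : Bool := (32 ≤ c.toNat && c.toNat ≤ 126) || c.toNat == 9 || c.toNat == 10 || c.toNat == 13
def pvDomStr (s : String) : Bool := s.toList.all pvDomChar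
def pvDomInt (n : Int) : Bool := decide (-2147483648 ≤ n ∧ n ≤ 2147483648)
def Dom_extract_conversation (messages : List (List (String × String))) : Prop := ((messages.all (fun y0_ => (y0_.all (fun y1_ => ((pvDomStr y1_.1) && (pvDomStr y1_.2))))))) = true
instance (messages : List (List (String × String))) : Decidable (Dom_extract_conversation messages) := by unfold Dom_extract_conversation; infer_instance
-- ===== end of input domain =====

-- B replaces A's two passes (find last user index, then rebuild skipping it) by one pass
-- that appends every user/assistant message and pops the recorded last user afterwards (objective: alternative).

-- msg.get(k) on the association list representing a Python dict (first match)
def dget (m : List (String × String)) (k : String) : Option String :=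
  (List.find? (fun p => p.1 == k) m).map (·.2)

-- ===== PORT A =====
-- first loop: for i, msg in enumerate(messages): if msg.get("role") == "user": last_user_index = i
def lastUserLoop (ms : List (List (String × String))) (i : Int) (acc : Option Int) : Option Int :=
  match ms with
  | [] => acc
  | m :: rest => lastUserLoop rest (i + 1) (if dget m "role" == some "user" then some i else acc)

-- second loop, carrying (system_message, scene_summary, last_user_message)
def loopA (ms : List (List (String × String))) (i : Int) (lui : Option Int)
    (st : Option String × (List (List (String × String))) × Option String) :
    Option String × (List (List (String × String))) × Option String :=
  match ms with
  | [] => st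
  | m :: rest =>
    let (sys, scene, lum) := st
    let role := dget m "role"
    let content := dget m "content"
    if role == some "system" then loopA rest (i + 1) lui (content, scene, lum)
    else if role == some "user" || role == some "assistant" then
      if role == some "user" && some i == lui then loopA rest (i + 1) lui (sys, scene, content)
      else loopA rest (i + 1) lui (sys, scene ++ [m], lum)
    else loopA rest (i + 1) lui (sys, scene, lum)

def extract_conversation (messages : List (List (String × String))) : Option String × (List (List (String × String))) × Option String :=
  loopA messages 0 (lastUserLoop messages 0 none) (none, [], none)

-- ===== PORT B =====
-- single loop, carrying (system_message, scene_summary, user_pos)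
def loopB (ms : List (List (String × String)))
    (st : Option String × (List (List (String × String))) × Option Int) :
    Option String × (List (List (String × String))) × Option Int :=
  match ms with
  | [] => st
  | m :: rest =>
    let (sys, scene, pos) := st
    let role := dget m "role"
    if role == some "system" then loopB rest (dget m "content", scene, pos)
    else if role == some "user" then loopB rest (sys, scene ++ [m], some ((scene ++ [m]).length - 1 : Int))
    else if role == some "assistant" then loopB rest (sys, scene ++ [m], pos)
    else loopB rest (sys, scene, pos)

def extract_conversation_alt (messages : List (List (String × String))) : Option String × (List (List (String × String))) × Option String :=
  let (sys, scene, pos) := loopB messages (none, [], none)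
  match pos with
  | none => (sys, scene, none)
  | some p =>
    match PySem.List.pop? scene p with
    | some (m, scene') => (sys, scene', dget m "content")
    | none => (sys, scene, none)   -- unreachable: the recorded position is always in range

-- ===== PRECONDITION & SPEC =====
def Spec_extract_conversation (messages : List (List (String × String))) (out : Option String × (List (List (String × String))) × Option String) : Prop := out = extract_conversation_alt messages
instance (messages : List (List (String × String))) (out : Option String × (List (List (String × String))) × Option String) : Decidable (Spec_extract_conversation messages out) := by unfold Spec_extract_conversation; infer_instance

-- ===== CLAIM (what is proved, stated in full; the proofs are below) =====
def Claim_equal_extract_conversation : Prop := ∀ (messages : List (List (String × String))), Dom_extract_conversation messages → Spec_extract_conversation messages (extract_conversation messages)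

-- ===== LEMMAS AND PROOFS =====

def isUser (m : List (String × String)) : Bool := dget m "role" == some "user"

def filterUA (ms : List (List (String × String))) : List (List (String × String)) :=
  ms.filter (fun m => dget m "role" == some "user" || dget m "role" == some "assistant")

def sysAfter (ms : List (List (String × String))) (sys : Option String) : Option String :=
  ms.foldl (fun a m => if dget m "role" == some "system" then dget m "content" else a) sys

lemma loopA_run (ms : List (List (String × String))) (i : Int) (lui : Option Int)
    (sys : Option String) (scene : List (List (String × String))) (lum : Option String)
    (h : ∀ k, lui = some k → k < i ∨ i + ms.length ≤ k) :
    loopA ms i lui (sys, scene, lum) = (sysAfter ms sys, scene ++ filterUA ms, lum) := by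
  induction ms generalizing i sys scene with
  | nil => simp [loopA, sysAfter, filterUA]
  | cons m rest ih =>
    have hrest : ∀ k, lui = some k → k < i + 1 ∨ (i + 1) + rest.length ≤ k := by
      intro k hk
      rcases h k hk with h' | h' <;> [left; right] <;> simp at h' ⊢ <;> omega
    have hne : (some i == lui) = false := by
      cases lui with
      | none => rfl
      | some k =>
        rcases h k rfl with h' | h' <;>
          · simp at h' ⊢
            intro hik; omega
    simp only [loopA]
    by_cases h1 : (dget m "role" == some "system") = true
    · have hnu : (dget m "role" == some "user") = false := by
        simp at h1 ⊢; simp [h1]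
      have hna : (dget m "role" == some "assistant") = false := by
        simp at h1 ⊢; simp [h1]
      have h1' : dget m "role" = some "system" := by simpa using h1
      simp [h1, ih _ _ _ hrest, sysAfter, filterUA, hnu, hna, h1']
    · simp only [h1]
      by_cases h2 : (dget m "role" == some "user" || dget m "role" == some "assistant") = true
      · simp only [h2, hne, Bool.and_false, if_true, if_false, Bool.false_eq_true,
          ih _ _ _ hrest, sysAfter, filterUA, List.filter_cons]
        simp_all
      · simp [h2, ih _ _ _ hrest, sysAfter, filterUA, List.filter_cons]
        simp_all

lemma lastUserLoop_no_user (ms : List (List (String × String))) (i : Int) (acc : Option Int)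
    (h : ∀ m ∈ ms, isUser m = false) : lastUserLoop ms i acc = acc := by
  induction ms generalizing i acc with
  | nil => rfl
  | cons m rest ih =>
    have := h m (by simp)
    simp [isUser] at this
    simp [lastUserLoop, this, ih _ _ (fun m hm => h m (by simp [hm]))]

lemma lastUserLoop_append (a b : List (List (String × String))) (i : Int) (acc : Option Int) :
    lastUserLoop (a ++ b) i acc = lastUserLoop b (i + a.length) (lastUserLoop a i acc) := by
  induction a generalizing i acc with
  | nil => simp [lastUserLoop]
  | cons m rest ih =>
    simp only [List.cons_append, lastUserLoop, ih]
    congr 1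
    simp; omega

lemma loopB_append (a b : List (List (String × String)))
    (st : Option String × (List (List (String × String))) × Option Int) :
    loopB (a ++ b) st = loopB b (loopB a st) := by
  induction a generalizing st with
  | nil => rfl
  | cons m rest ih =>
    obtain ⟨sys, scene, pos⟩ := st
    simp only [List.cons_append, loopB]
    split_ifs <;> exact ih _

lemma loopB_sys_scene (ms : List (List (String × String))) (sys : Option String)
    (scene : List (List (String × String))) (pos : Option Int) :
    (loopB ms (sys, scene, pos)).1 = sysAfter ms sys ∧
    (loopB ms (sys, scene, pos)).2.1 = scene ++ filterUA ms := by
  induction ms generalizing sys scene pos with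
  | nil => simp [loopB, sysAfter, filterUA]
  | cons m rest ih =>
    simp only [loopB, sysAfter, filterUA, List.filter_cons, List.foldl_cons]
    split_ifs with h1 h2 h3 <;>
      simp_all [sysAfter, filterUA, loopB] <;> simp [ih]

lemma loopB_pos_no_user (ms : List (List (String × String))) (sys : Option String)
    (scene : List (List (String × String))) (pos : Option Int)
    (h : ∀ m ∈ ms, isUser m = false) :
    (loopB ms (sys, scene, pos)).2.2 = pos := by
  induction ms generalizing sys scene pos with
  | nil => rfl
  | cons m rest ih =>
    have hm := h m (by simp)
    simp [isUser] at hm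
    have ihr := fun sys scene pos => ih sys scene pos (fun m hm => h m (by simp [hm]))
    simp only [loopB, hm]
    split_ifs <;> simp_all [ihr]

-- decompose a list containing a user message at its last user occurrence
lemma exists_last_user (ms : List (List (String × String)))
    (h : ∃ m ∈ ms, isUser m = true) :
    ∃ p u q, ms = p ++ u :: q ∧ isUser u = true ∧ ∀ m ∈ q, isUser m = false := by
  induction ms with
  | nil => simp at h
  | cons m rest ih =>
    by_cases hr : ∃ m ∈ rest, isUser m = true
    · obtain ⟨p, u, q, hms, hu, hq⟩ := ih hr
      exact ⟨m :: p, u, q, by simp [hms], hu, hq⟩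
    · have hm : isUser m = true := by
        obtain ⟨x, hx, hux⟩ := h
        rcases List.mem_cons.mp hx with rfl | hx
        · exact hux
        · exact absurd ⟨x, hx, hux⟩ hr
      refine ⟨[], m, rest, by simp, hm, ?_⟩
      intro x hx
      by_contra hc
      exact hr ⟨x, hx, by simpa using hc⟩

lemma no_user_case (ms : List (List (String × String)))
    (h : ∀ m ∈ ms, isUser m = false) :
    extract_conversation ms = extract_conversation_alt ms := by
  have hlui : lastUserLoop ms 0 none = none := lastUserLoop_no_user ms 0 none h
  have hA := loopA_run ms 0 none none [] none (by intro k hk; cases hk)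
  have hB := loopB_sys_scene ms none [] none
  have hBp := loopB_pos_no_user ms none [] none h
  have hBfull : loopB ms (none, [], none) = (sysAfter ms none, filterUA ms, none) := by
    rw [Prod.ext_iff, Prod.ext_iff]
    exact ⟨hB.1, by simpa using hB.2, hBp⟩
  simp only [extract_conversation, extract_conversation_alt, hlui, hA, hBfull]
  simp

lemma loopA_append (a b : List (List (String × String))) (i : Int) (lui : Option Int)
    (st : Option String × (List (List (String × String))) × Option String) :
    loopA (a ++ b) i lui st = loopA b (i + a.length) lui (loopA a i lui st) := by
  induction a generalizing i st with
  | nil => simp [loopA]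
  | cons m rest ih =>
    obtain ⟨sys, scene, lum⟩ := st
    have harith : (i + 1) + (rest.length : Int) = i + ((m :: rest).length : Int) := by
      simp only [List.length_cons]; push_cast; omega
    simp only [List.cons_append, loopA]
    split_ifs <;> rw [ih, harith]

lemma eraseIdx_append_middle (a b : List (List (String × String))) (x : List (String × String)) :
    (a ++ x :: b).eraseIdx a.length = a ++ b := by
  induction a with
  | nil => simp
  | cons y rest ih => simp [List.eraseIdx, ih]

lemma user_case (p q : List (List (String × String))) (u : List (String × String))
    (hu : isUser u = true) (hq : ∀ m ∈ q, isUser m = false) :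
    extract_conversation (p ++ u :: q) = extract_conversation_alt (p ++ u :: q) := by
  have hrole : dget u "role" = some "user" := by simpa [isUser] using hu
  -- last user index is p.length
  have hlui : lastUserLoop (p ++ u :: q) 0 none = some (p.length : Int) := by
    rw [lastUserLoop_append]
    simp only [lastUserLoop, hrole]
    rw [lastUserLoop_no_user q _ _ hq]
    simp
  -- A side
  have hAp := loopA_run p 0 (some (p.length : Int)) none [] none
    (by intro k hk; right; simp at hk; omega)
  have hAq := loopA_run q ((p.length : Int) + 1) (some (p.length : Int))
    (sysAfter p none) (filterUA p) (dget u "content")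
    (by intro k hk; left; simp at hk; omega)
  have hA : extract_conversation (p ++ u :: q) =
      (sysAfter q (sysAfter p none), filterUA p ++ filterUA q, dget u "content") := by
    simp only [extract_conversation, hlui]
    rw [loopA_append]
    simp only [hAp, List.nil_append, loopA, hrole]
    norm_num
    rw [hAq]
    simp
  -- B side
  have hBp := loopB_sys_scene p none [] none
  have hst : loopB p (none, [], none)
      = ((loopB p (none, [], none)).1, (loopB p (none, [], none)).2.1, (loopB p (none, [], none)).2.2) := rfl
  have hBfull : loopB (p ++ u :: q) (none, [], none)
      = (sysAfter q (sysAfter p none), filterUA p ++ u :: filterUA q, some ((filterUA p).length : Int)) := by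
    have hBp2 : (loopB p (none, [], none)).2.1 = filterUA p := by simpa using hBp.2
    rw [loopB_append, hst, hBp.1, hBp2]
    have hnsys : (dget u "role" == some "system") = false := by simp [hrole]
    simp only [loopB, hnsys, hrole]
    norm_num
    have hq1 := loopB_sys_scene q (sysAfter p none) (filterUA p ++ [u]) (some ((filterUA p).length : Int))
    have hq2 := loopB_pos_no_user q (sysAfter p none) (filterUA p ++ [u]) (some ((filterUA p).length : Int)) hq
    rw [if_neg (by decide), Prod.ext_iff, Prod.ext_iff]
    refine ⟨hq1.1, ?_, hq2⟩
    rw [hq1.2]; simp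
  have hlen : (filterUA p).length < (filterUA p ++ u :: filterUA q).length := by
    simp only [List.length_append, List.length_cons]; omega
  have hget : (filterUA p ++ u :: filterUA q)[(filterUA p).length]'hlen = u := by
    rw [List.getElem_append_right (by omega)]
    simp
  have hpop : PySem.List.pop? (filterUA p ++ u :: filterUA q) ((filterUA p).length : Int)
      = some (u, filterUA p ++ filterUA q) := by
    rw [PySem.List.pop?_natCast _ _ hlen, hget, eraseIdx_append_middle]
  rw [hA]
  simp only [extract_conversation_alt, hBfull, hpop]

-- ===== VERDICT (by name: the statement is the Claim_ definition above) =====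
theorem extract_conversation_spec : Claim_equal_extract_conversation := by
  intro ms _
  unfold Spec_extract_conversation
  by_cases h : ∃ m ∈ ms, isUser m = true
  · obtain ⟨p, u, q, rfl, hu, hq⟩ := exists_last_user ms h
    exact user_case p q u hu hq
  · exact no_user_case ms (by
      intro m hm
      by_contra hc
      exact h ⟨m, hm, by simpa using hc⟩)
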